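-- pv_equiv track=rewrite | github.com/IorenzoLF/Le_Refuge | Le_refuge/arc_agi_refuge/explorer_decoupage.py | detecter_lignes_grises
-- ===== SOURCE A (Python) =====
-- def detecter_lignes_grises(grille):
--     lignes_grises = []
--
--     # Lignes horizontales
--     for i in range(len(grille)):
--         if all(cell == 5 for cell in grille[i]):
--             lignes_grises.append(f"Ligne horiz {i}")
--
--     # Colonnes verticales
--     for j in range(len(grille[0])):
--         if all(grille[i][j] == 5 for i in range(len(grille))):
--             lignes_grises.append(f"Colonne vert {j}")
--
--     return lignes_grises
-- ===== SOURCE B (Python) =====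
-- def detecter_lignes_grises(grille):
--     ncols = len(grille[0])
--     col_gray = [True] * ncols
--     lignes_grises = []
--     for i, row in enumerate(grille):
--         if all(cell == 5 for cell in row):
--             lignes_grises.append(f"Ligne horiz {i}")
--         for j, cell in enumerate(row[:ncols]):
--             if cell != 5:
--                 col_gray[j] = False
--     for j in range(ncols):
--         if col_gray[j]:
--             lignes_grises.append(f"Colonne vert {j}")
--     return lignes_grises
-- ===== Notes on version B (the rewrite author's own statement) =====
-- stated objective: alternative
-- what changed: Single pass over the rows maintains a per-column all-gray accumulator (updated once per cell), replacing A's second full scan of the grid that re-probes every row for each column; same asymptotic cost.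
import Mathlib
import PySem

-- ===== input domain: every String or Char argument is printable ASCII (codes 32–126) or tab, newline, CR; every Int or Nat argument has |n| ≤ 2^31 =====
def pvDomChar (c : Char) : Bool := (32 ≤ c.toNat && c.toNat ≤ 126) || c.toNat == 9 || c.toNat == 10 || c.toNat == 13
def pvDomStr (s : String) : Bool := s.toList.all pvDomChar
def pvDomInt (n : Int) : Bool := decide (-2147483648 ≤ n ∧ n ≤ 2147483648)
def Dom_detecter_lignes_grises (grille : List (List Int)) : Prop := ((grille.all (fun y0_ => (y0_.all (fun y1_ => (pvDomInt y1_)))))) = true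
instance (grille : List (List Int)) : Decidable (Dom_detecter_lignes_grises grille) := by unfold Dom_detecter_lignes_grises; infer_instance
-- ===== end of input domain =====

-- B replaces A's second full grid scan (a fresh probe of every row per column) by a per-column
-- all-gray accumulator updated once per cell during the single row pass (objective: alternative, same cost).

-- B replaces A's second full grid scan (one probe of every row per column) by a per-column
-- all-gray accumulator updated once per cell during the single row pass (objective: alternative, same cost).

-- ===== PORT A =====
def detecter_lignes_grises (grille : List (List Int)) : List String :=
  -- lignes horizontales
  let lignes1 : List String :=
    (PySem.List.pyRange 0 grille.length 1).foldl (fun acc i =>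
      if (PySem.List.pyGetD grille i []).all (fun cell => cell == 5) then
        acc ++ ["Ligne horiz " ++ PySem.Int.toStr i]
      else acc) []
  -- colonnes verticales
  (PySem.List.pyRange 0 (PySem.List.pyGetD grille 0 []).length 1).foldl (fun acc j =>
    if (PySem.List.pyRange 0 grille.length 1).all (fun i =>
        PySem.List.pyGetD (PySem.List.pyGetD grille i []) j 0 == 5) then
      acc ++ ["Colonne vert " ++ PySem.Int.toStr j]
    else acc) lignes1

-- ===== PORT B =====
def detecter_lignes_grises_alt (grille : List (List Int)) : List String :=
  let ncols := (grille.headD []).length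
  let st : List String × List Bool :=
    (PySem.List.enumerate grille).foldl (fun st p =>
      let res := if p.2.all (fun cell => cell == 5) then
          st.1 ++ ["Ligne horiz " ++ PySem.Int.toStr p.1] else st.1
      let colg := (PySem.List.enumerate
          (PySem.List.slice p.2 none (some (ncols : Int)))).foldl (fun cg q =>
          if q.2 != 5 then cg.set q.1.toNat false else cg) st.2
      (res, colg)) ([], List.replicate ncols true)
  (PySem.List.pyRange 0 ncols 1).foldl (fun acc j =>
    if st.2.getD j.toNat false then acc ++ ["Colonne vert " ++ PySem.Int.toStr j]
    else acc) st.1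

-- ===== PRECONDITION & SPEC =====
-- Pre_ excludes exactly the inputs where A raises IndexError: the empty grid (grille[0]),
-- and ragged grids on which some column scan reaches a row shorter than the column index
-- before having met a non-gray cell in that column.
def Pre_detecter_lignes_grises (grille : List (List Int)) : Prop :=
  grille ≠ [] ∧
  ∀ j < (grille.headD []).length, ∀ i < grille.length,
    (grille.getD i []).length ≤ j →
      ∃ i' < i, j < (grille.getD i' []).length ∧ (grille.getD i' []).getD j 0 ≠ 5
instance (grille : List (List Int)) : Decidable (Pre_detecter_lignes_grises grille) := by
  unfold Pre_detecter_lignes_grises; infer_instance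
def pvWitness_detecter_lignes_grises : List (List Int) := [[5, 1], [5, 5], [5, 5]]

def Spec_detecter_lignes_grises (grille : List (List Int)) (out : List String) : Prop := out = detecter_lignes_grises_alt grille
instance (grille : List (List Int)) (out : List String) : Decidable (Spec_detecter_lignes_grises grille out) := by unfold Spec_detecter_lignes_grises; infer_instance

-- ===== CLAIM (what is proved, stated in full; the proofs are below) =====
def Claim_equal_detecter_lignes_grises : Prop := ∀ (grille : List (List Int)), Dom_detecter_lignes_grises grille → Pre_detecter_lignes_grises grille → Spec_detecter_lignes_grises grille (detecter_lignes_grises grille)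

-- ===== LEMMAS AND PROOFS =====

-- reference form of the "Ligne horiz" part
def rowsOf : List (List Int) → Int → List String
  | [], _ => []
  | r :: rs, s =>
      (if r.all (fun cell => cell == 5) then ["Ligne horiz " ++ PySem.Int.toStr s] else [])
        ++ rowsOf rs (s + 1)

-- A's row loop computes rowsOf
theorem A_rows (grille : List (List Int)) :
    ∀ (tail : List (List Int)) (s : Nat) (acc : List String), grille.drop s = tail →
      (PySem.List.pyRange s grille.length 1).foldl (fun acc i =>
        if (PySem.List.pyGetD grille i []).all (fun cell => cell == 5) then
          acc ++ ["Ligne horiz " ++ PySem.Int.toStr i]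
        else acc) acc = acc ++ rowsOf tail s := by
  intro tail
  induction tail with
  | nil =>
      intro s acc h
      have hs : grille.length ≤ s := by
        by_contra hlt
        have : grille.drop s ≠ [] := by
          simp only [ne_eq, List.drop_eq_nil_iff]
          omega
        exact this h
      rw [PySem.List.pyRange_one_eq_nil (by exact_mod_cast hs)]
      simp [rowsOf]
  | cons r rs ih =>
      intro s acc h
      have hs : s < grille.length := by
        by_contra hge
        push Not at hge
        rw [List.drop_of_length_le hge] at h
        exact absurd h (by simp)
      have hget : grille.getD s [] = r := by
        have h0 : (grille.drop s)[0]? = some r := by rw [h]; rfl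
        rw [List.getElem?_drop] at h0
        simp only [Nat.add_zero] at h0
        simp [List.getD, h0]
      have hdrop : grille.drop (s + 1) = rs := by
        have := congrArg (List.drop 1) h
        simpa [List.drop_drop, Nat.add_comm] using this
      rw [PySem.List.pyRange_one_cons (by exact_mod_cast hs)]
      rw [List.foldl_cons]
      have hcast : ((s : Int) + 1) = ((s + 1 : Nat) : Int) := by push_cast; ring
      rw [hcast, ih (s + 1) _ hdrop]
      simp only [PySem.List.pyGetD_natCast, hget, rowsOf]
      split <;> simp

-- B's inner column-accumulator fold updates the touched prefix of the accumulator
theorem inner_zip (r : List Int) :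
    ∀ (s : Nat) (cg : List Bool), s + r.length ≤ cg.length →
      (PySem.List.enumerate r (s : Int)).foldl (fun cg q =>
          if q.2 != 5 then cg.set q.1.toNat false else cg) cg
        = cg.take s ++ List.zipWith (fun b c => b && (c == 5)) (cg.drop s) r
            ++ cg.drop (s + r.length) := by
  induction r with
  | nil =>
      intro s cg h
      simp [PySem.List.enumerate_nil, List.take_append_drop]
  | cons c r ih =>
      intro s cg h
      simp only [List.length_cons] at h
      have hs : s < cg.length := by omega
      rw [PySem.List.enumerate_cons]
      rw [List.foldl_cons]
      have hcast : ((s : Int) + 1) = ((s + 1 : Nat) : Int) := by push_cast; ring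
      have hdrop : cg.drop s = cg[s] :: cg.drop (s + 1) := by
        exact (List.getElem_cons_drop hs).symm
      have harith : s + (r.length + 1) = (s + 1) + r.length := by omega
      by_cases hc : c = 5
      · rw [show (((s : Int), c).2 != 5) = false by simp [hc]]
        simp only [Bool.false_eq_true, if_false]
        rw [hcast, ih (s + 1) cg (by omega)]
        have htake : cg.take (s + 1) = cg.take s ++ [cg[s]] := by
          rw [List.take_add_one, List.getElem?_eq_getElem hs]; rfl
        conv_rhs => rw [hdrop]
        rw [List.zipWith_cons_cons, show (cg[s] && (c == 5)) = cg[s] by simp [hc]]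
        rw [htake]
        simp only [List.length_cons, harith, List.append_assoc, List.cons_append, List.nil_append]
      · rw [show (((s : Int), c).2 != 5) = true by simp [hc]]
        simp only [if_true]
        have htn : ((s : Int), c).1.toNat = s := by simp
        rw [htn]
        rw [hcast, ih (s + 1) (cg.set s false) (by simp; omega)]
        have hset : cg.set s false = cg.take s ++ false :: cg.drop (s + 1) := by
          rw [List.set_eq_take_append_cons_drop, if_pos hs]
        have h1 : (cg.set s false).take (s + 1) = cg.take s ++ [false] := by
          rw [hset, List.take_append, List.length_take, Nat.min_eq_left hs.le]
          simp [List.take_take]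
        have h2 : (cg.set s false).drop (s + 1) = cg.drop (s + 1) := by
          rw [hset, List.drop_append, List.length_take, Nat.min_eq_left hs.le]
          simp
        have h3 : (cg.set s false).drop ((s + 1) + r.length) = cg.drop ((s + 1) + r.length) := by
          rw [← List.drop_drop, h2, List.drop_drop]
        conv_rhs => rw [hdrop]
        rw [List.zipWith_cons_cons, show (cg[s] && (c == 5)) = false by simp [hc], h1, h2, h3]
        simp only [List.length_cons, harith, List.append_assoc, List.cons_append, List.nil_append]

-- B's outer fold splits into the row part and a column fold
theorem B_fold (m : Nat) :
    ∀ (gs : List (List Int)) (s : Int) (acc : List String) (cg : List Bool),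
      cg.length = m →
      (PySem.List.enumerate gs s).foldl (fun st p =>
        let res := if p.2.all (fun cell => cell == 5) then
            st.1 ++ ["Ligne horiz " ++ PySem.Int.toStr p.1] else st.1
        let colg := (PySem.List.enumerate
            (PySem.List.slice p.2 none (some (m : Int)))).foldl (fun cg q =>
            if q.2 != 5 then cg.set q.1.toNat false else cg) st.2
        (res, colg)) (acc, cg)
      = (acc ++ rowsOf gs s,
         gs.foldl (fun cg r =>
           List.zipWith (fun b c => b && (c == 5)) cg (r.take m)
             ++ cg.drop (r.take m).length) cg) := by
  intro gs
  induction gs with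
  | nil => intro s acc cg _; simp [PySem.List.enumerate_nil, rowsOf]
  | cons r rs ih =>
      intro s acc cg hcg
      rw [PySem.List.enumerate_cons, List.foldl_cons]
      have hsl : PySem.List.slice r none (some (m : Int)) = r.take m :=
        PySem.List.slice_to_natCast r m
      have hinner : (PySem.List.enumerate (PySem.List.slice r none (some (m : Int)))).foldl
            (fun cg q => if q.2 != 5 then cg.set q.1.toNat false else cg) cg
          = List.zipWith (fun b c => b && (c == 5)) cg (r.take m)
              ++ cg.drop (r.take m).length := by
        rw [hsl]
        have := inner_zip (r.take m) 0 cg (by simp [List.length_take]; omega)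
        simpa using this
      simp only []
      rw [hinner]
      rw [ih (s + 1) _ _ (by simp [List.length_append, List.length_zipWith, List.length_drop, List.length_take, hcg])]
      rw [List.foldl_cons]
      simp only [rowsOf]
      split <;> simp

-- pointwise value of the column fold
theorem colfold_getD (m j : Nat) (hj : j < m) :
    ∀ (gs : List (List Int)) (cg : List Bool), cg.length = m →
      (gs.foldl (fun cg r =>
          List.zipWith (fun b c => b && (c == 5)) cg (r.take m)
            ++ cg.drop (r.take m).length) cg).getD j false
        = (cg.getD j false && gs.all (fun r => (r.take m).getD j 5 == 5)) := by
  intro gs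
  induction gs with
  | nil => intro cg _; simp
  | cons r gs ih =>
      intro cg hcg
      have hrm : (r.take m).length ≤ m := by simp [List.length_take]
      have hzl : (List.zipWith (fun b c => b && (c == 5)) cg (r.take m)).length
          = (r.take m).length := by
        rw [List.length_zipWith, hcg]; omega
      have hzlen : (List.zipWith (fun b c => b && (c == 5)) cg (r.take m)
            ++ cg.drop (r.take m).length).length = m := by
        rw [List.length_append, hzl, List.length_drop, hcg]; omega
      have hupd : (List.zipWith (fun b c => b && (c == 5)) cg (r.take m)
            ++ cg.drop (r.take m).length).getD j false
          = (cg.getD j false && ((r.take m).getD j 5 == 5)) := by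
        rw [List.getD_eq_getElem?_getD]
        by_cases hlt : j < (r.take m).length
        · rw [List.getElem?_append_left (by rw [hzl]; exact hlt)]
          rw [List.getElem?_zipWith]
          rw [List.getElem?_eq_getElem (by rw [hcg]; omega), List.getElem?_eq_getElem hlt]
          rw [List.getD_eq_getElem _ _ (by rw [hcg]; omega), List.getD_eq_getElem _ _ hlt]
          rfl
        · rw [List.getElem?_append_right (by simp only [hzl]; omega)]
          rw [hzl, List.getElem?_drop]
          rw [show (r.take m).length + (j - (r.take m).length) = j by omega]
          rw [List.getD_eq_default (r.take m) 5 (by omega)]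
          simp [List.getD_eq_getElem?_getD]
      rw [List.foldl_cons, ih _ hzlen, hupd, List.all_cons, Bool.and_assoc]

-- under Pre_'s column-safety condition, A's column test agrees with B's accumulator
theorem colcond (gs : List (List Int)) (m j : Nat) (hj : j < m)
    (hsafe : ∀ i < gs.length, (gs.getD i []).length ≤ j →
        ∃ i' < i, j < (gs.getD i' []).length ∧ (gs.getD i' []).getD j 0 ≠ 5) :
    gs.all (fun r => r.getD j 0 == 5) = gs.all (fun r => (r.take m).getD j 5 == 5) := by
  have hb : ∀ a b : Bool, ((a = true) ↔ (b = true)) → a = b := by decide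
  apply hb
  simp only [List.all_eq_true, beq_iff_eq]
  constructor
  · intro h r hr
    have h5 := h r hr
    by_cases hlen : j < r.length
    · have hjt : j < (r.take m).length := by simp [List.length_take]; omega
      rw [List.getD_eq_getElem _ _ hjt, List.getElem_take]
      rw [List.getD_eq_getElem _ _ hlen] at h5
      exact h5
    · rw [List.getD_eq_default _ 5 (by simp [List.length_take]; omega)]
  · intro h r hr
    obtain ⟨i, hi, rfl⟩ := List.mem_iff_getElem.mp hr
    have hlen : j < gs[i].length := by
      by_contra hge
      obtain ⟨i', hi', hlt', hne'⟩ := hsafe i hi (by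
        rw [List.getD_eq_getElem _ _ hi]; omega)
      rw [List.getD_eq_getElem gs [] (by omega)] at hlt' hne'
      have hmem' : gs[i'] ∈ gs := List.getElem_mem _
      have := h _ hmem'
      rw [List.getD_eq_getElem _ _ (by simp [List.length_take]; omega), List.getElem_take] at this
      rw [List.getD_eq_getElem _ _ hlt'] at hne'
      exact hne' this
    rw [List.getD_eq_getElem _ _ hlen]
    have := h _ hr
    rw [List.getD_eq_getElem _ _ (by simp [List.length_take]; omega), List.getElem_take] at this
    exact this

-- congruence for the append-if fold over a range
theorem condFold_congr (g : Int → List String) (p q : Int → Bool) :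
    ∀ (L : List Int) (acc : List String), (∀ j ∈ L, p j = q j) →
      L.foldl (fun acc j => if p j then acc ++ g j else acc) acc
        = L.foldl (fun acc j => if q j then acc ++ g j else acc) acc := by
  intro L
  induction L with
  | nil => intro acc _; rfl
  | cons x xs ih =>
      intro acc h
      simp only [List.foldl_cons, h x (by simp)]
      exact ih _ (fun j hj => h j (by simp [hj]))

-- all-congruence on members
theorem all_congr_mem {α : Type} (p q : α → Bool) :
    ∀ (l : List α), (∀ x ∈ l, p x = q x) → l.all p = l.all q := by
  intro l
  induction l with
  | nil => intro _; rfl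
  | cons x xs ih =>
      intro h
      simp only [List.all_cons, h x (by simp), ih (fun y hy => h y (by simp [hy]))]

-- ===== VERDICT (by name: the statement is the Claim_ definition above) =====
theorem detecter_lignes_grises_spec : Claim_equal_detecter_lignes_grises := by
  intro grille _ hpre
  obtain ⟨hne, hsafe⟩ := hpre
  obtain ⟨g0, rest, rfl⟩ : ∃ g0 rest, grille = g0 :: rest := by
    cases grille with
    | nil => exact absurd rfl hne
    | cons a b => exact ⟨a, b, rfl⟩
  unfold Spec_detecter_lignes_grises detecter_lignes_grises detecter_lignes_grises_alt
  simp only [List.headD_cons, PySem.List.pyGetD_zero_cons] at hsafe ⊢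
  have hA : (PySem.List.pyRange 0 ((g0 :: rest).length : Int) 1).foldl (fun acc i =>
        if (PySem.List.pyGetD (g0 :: rest) i []).all (fun cell => cell == 5) then
          acc ++ ["Ligne horiz " ++ PySem.Int.toStr i]
        else acc) [] = rowsOf (g0 :: rest) 0 := by
    simpa using A_rows (g0 :: rest) (g0 :: rest) 0 [] (by simp)
  rw [hA]
  have hB' : (List.foldl (fun (st : List String × List Bool) p =>
        (if (p.2.all fun cell => cell == 5) = true then
            st.1 ++ ["Ligne horiz " ++ PySem.Int.toStr p.1] else st.1,
          List.foldl (fun cg q => if (q.2 != 5) = true then cg.set q.1.toNat false else cg) st.2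
            (PySem.List.enumerate (PySem.List.slice p.2 none (some ((g0.length : Nat) : Int))))))
        ([], List.replicate g0.length true) (PySem.List.enumerate (g0 :: rest)))
      = ([] ++ rowsOf (g0 :: rest) 0,
         (g0 :: rest).foldl (fun cg r =>
           List.zipWith (fun b c => b && (c == 5)) cg (r.take g0.length)
             ++ cg.drop (r.take g0.length).length) (List.replicate g0.length true)) :=
    B_fold g0.length (g0 :: rest) 0 [] (List.replicate g0.length true) (by simp)
  simp only [hB', List.nil_append]
  refine condFold_congr (fun j => ["Colonne vert " ++ PySem.Int.toStr j]) _ _ _ _ ?_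
  intro j hj
  rw [PySem.List.mem_pyRange_one] at hj
  have hj0 : 0 ≤ j := hj.1
  have hjm : j.toNat < g0.length := by omega
  have hcolB : ((g0 :: rest).foldl (fun cg r =>
        List.zipWith (fun b c => b && (c == 5)) cg (r.take g0.length)
          ++ cg.drop (r.take g0.length).length) (List.replicate g0.length true)).getD j.toNat false
      = (g0 :: rest).all (fun r => (r.take g0.length).getD j.toNat 5 == 5) := by
    rw [colfold_getD g0.length j.toNat hjm (g0 :: rest) (List.replicate g0.length true) (by simp)]
    rw [List.getD_replicate true hjm, Bool.true_and]
  rw [hcolB]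
  have hmap : ((PySem.List.pyRange 0 (((g0 :: rest).length : Nat) : Int) 1).all
        (fun i => PySem.List.pyGetD (PySem.List.pyGetD (g0 :: rest) i []) j 0 == 5))
      = (g0 :: rest).all (fun r => PySem.List.pyGetD r j 0 == 5) := by
    conv_rhs => rw [← PySem.List.map_pyGetD_pyRange_zero' (g0 :: rest) []]
    rw [List.all_map]
    rfl
  rw [hmap]
  have hAg : (g0 :: rest).all (fun r => PySem.List.pyGetD r j 0 == 5)
      = (g0 :: rest).all (fun r => r.getD j.toNat 0 == 5) := by
    refine all_congr_mem _ _ (g0 :: rest) ?_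
    intro r hr
    have : PySem.List.pyGetD r j 0 = r.getD j.toNat 0 := by
      rw [show j = ((j.toNat : Nat) : Int) by omega, PySem.List.pyGetD_natCast]
      simp [List.getD]
      rw [show max j 0 = j from by omega]
    rw [this]
  rw [hAg]
  exact colcond (g0 :: rest) g0.length j.toNat hjm (hsafe j.toNat hjm)
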